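-- pv_equiv track=rewrite | github.com/danielbaraniak/advent-of-code | python/19.py | count_possible_combinations
-- ===== SOURCE A (Python) =====
-- def count_possible_combinations(available: list[str], desired_towel: str,  cache: dict[str, int]) -> bool:
--
--     if desired_towel in cache:
--         return cache[desired_towel]
--     counter = 0
--
--     if not desired_towel:
--         return 1
--
--     for i in range(1, len(desired_towel) + 1):
--         towel_part = desired_towel[:i]
--         if towel_part in available:
--             counter += count_possible_combinations(
--                 available, desired_towel[i:], cache)
--
--     cache[desired_towel] = counter
--     return counter
-- ===== SOURCE B (Python) =====
-- def count_possible_combinations(available: list[str], desired_towel: str, cache: dict[str, int]) -> bool: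
--     # Bottom-up DP over suffixes (set membership, prefix length bounded by the
--     # longest available pattern) instead of memoised recursion; unlike A it
--     # does not write new entries into `cache` (return value is identical).
--     avail = set(available)
--     max_len = 0
--     for p in available:
--         if len(p) > max_len:
--             max_len = len(p)
--     n = len(desired_towel)
--     dp = [0] * (n + 1)
--     for j in range(n, -1, -1):
--         suffix = desired_towel[j:]
--         if suffix in cache:
--             dp[j] = cache[suffix]
--         elif j == n:
--             dp[j] = 1
--         else:
--             total = 0
--             for length in range(1, min(max_len, n - j) + 1):
--                 if desired_towel[j:j + length] in avail:
--                     total += dp[j + length]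
--             dp[j] = total
--     return dp[0]
-- ===== Notes on version B (the rewrite author's own statement) =====
-- stated objective: faster
-- what changed: Replaces A's top-down memoised recursion (with an O(N) list-membership scan per prefix and every prefix length tried) by a bottom-up DP over suffixes that uses a set for O(1) pattern membership and bounds the prefix loop by the longest available pattern; B does not mutate the caller's cache (return value identical).
import Mathlib
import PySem

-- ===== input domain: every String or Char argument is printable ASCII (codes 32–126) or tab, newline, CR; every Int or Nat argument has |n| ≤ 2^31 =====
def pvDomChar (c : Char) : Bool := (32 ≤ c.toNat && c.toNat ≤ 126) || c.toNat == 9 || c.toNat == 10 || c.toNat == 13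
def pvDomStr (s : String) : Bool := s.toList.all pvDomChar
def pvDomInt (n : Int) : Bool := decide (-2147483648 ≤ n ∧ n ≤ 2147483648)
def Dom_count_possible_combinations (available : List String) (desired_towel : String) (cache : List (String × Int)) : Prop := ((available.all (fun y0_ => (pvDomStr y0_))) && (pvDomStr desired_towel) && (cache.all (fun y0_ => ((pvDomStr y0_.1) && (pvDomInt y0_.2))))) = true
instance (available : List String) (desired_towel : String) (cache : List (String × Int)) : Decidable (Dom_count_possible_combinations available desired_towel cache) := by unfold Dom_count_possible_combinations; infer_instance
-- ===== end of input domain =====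

-- B replaces A's memoised recursion by a bottom-up suffix DP with set membership and a
-- max-pattern-length bound; A mutates `cache` in place, B does not — the theorems below
-- are about the RETURN value only.

-- ===== PORT A =====
-- A's recursion threads the mutable dict `cache` as explicit state; the `for i in
-- range(1, len(desired_towel)+1)` loop is the mutual helper `cpcLoop`.
mutual
def cpcAux (available : List String) (s : List Char) (cache : PySem.Dict String Int) :
    Int × PySem.Dict String Int :=
  match PySem.Dict.get? cache (String.ofList s) with
  | some v => (v, cache)                        -- if desired_towel in cache: return cache[desired_towel]
  | none =>
    if s.isEmpty then (1, cache)                -- if not desired_towel: return 1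
    else
      let r := cpcLoop available s 1 0 cache    -- counter = 0; for i in range(1, len+1): ...
      (r.1, PySem.Dict.insert r.2 (String.ofList s) r.1)  -- cache[desired_towel] = counter
termination_by (s.length, s.length + 1)

def cpcLoop (available : List String) (s : List Char) (i : Nat) (counter : Int)
    (cache : PySem.Dict String Int) : Int × PySem.Dict String Int :=
  if h : 1 ≤ i ∧ i ≤ s.length then
    if available.contains (String.ofList (s.take i)) then      -- towel_part in available
      let r := cpcAux available (s.drop i) cache
      cpcLoop available s (i + 1) (counter + r.1) r.2
    else
      cpcLoop available s (i + 1) counter cache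
  else (counter, cache)
termination_by (s.length, s.length + 1 - i)
decreasing_by
  · apply Prod.Lex.left
    simp only [List.length_drop]
    omega
  · apply Prod.Lex.right
    omega
  · apply Prod.Lex.right
    omega
end

def count_possible_combinations (available : List String) (desired_towel : String)
    (cache : List (String × Int)) : Int :=
  (cpcAux available desired_towel.toList (PySem.Dict.mk cache)).1

-- ===== PORT B =====
-- max_len = 0; for p in available: if len(p) > max_len: max_len = len(p)
def cpcMaxLen (available : List String) : Nat :=
  available.foldl (fun m p => if p.toList.length > m then p.toList.length else m) 0

-- the body of B's `for j in ...` loop: dp[j] for the suffix desired_towel[j:],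
-- `dp` holding the already-computed values dp[j+1..n] (front = dp[j+1])
def cpcVal (avail : PySem.Set String) (cacheD : PySem.Dict String Int) (maxLen : Nat)
    (suffix : List Char) (dp : List Int) : Int :=
  match PySem.Dict.get? cacheD (String.ofList suffix) with
  | some v => v
  | none =>
    if suffix.isEmpty then 1                                   -- elif j == n: dp[j] = 1
    else
      (List.range (min maxLen suffix.length)).foldl            -- for length in range(1, min(max_len, n-j)+1)
        (fun total k =>
          if PySem.Set.contains avail (String.ofList (suffix.take (k + 1))) then
            total + dp.getD k 0                                -- total += dp[j + length]
          else total) 0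

-- for j in range(n, -1, -1): dp[j] = ...   (j = k - 1 at each step, values prepended)
def cpcGo (avail : PySem.Set String) (cacheD : PySem.Dict String Int) (maxLen : Nat)
    (s : List Char) : Nat → List Int → List Int
  | 0, dp => dp
  | k + 1, dp => cpcGo avail cacheD maxLen s k (cpcVal avail cacheD maxLen (s.drop k) dp :: dp)

def count_possible_combinations_alt (available : List String) (desired_towel : String)
    (cache : List (String × Int)) : Int :=
  let avail := PySem.Set.ofList available
  let cacheD := PySem.Dict.mk cache
  let s := desired_towel.toList
  (cpcGo avail cacheD (cpcMaxLen available) s (s.length + 1) []).headD 0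

-- ===== PRECONDITION & SPEC =====
def Spec_count_possible_combinations (available : List String) (desired_towel : String) (cache : List (String × Int)) (out : Int) : Prop := out = count_possible_combinations_alt available desired_towel cache
instance (available : List String) (desired_towel : String) (cache : List (String × Int)) (out : Int) : Decidable (Spec_count_possible_combinations available desired_towel cache out) := by unfold Spec_count_possible_combinations; infer_instance

-- ===== CLAIM (what is proved, stated in full; the proofs are below) =====
def Claim_equal_count_possible_combinations : Prop := ∀ (available : List String) (desired_towel : String) (cache : List (String × Int)), Dom_count_possible_combinations available desired_towel cache → Spec_count_possible_combinations available desired_towel cache (count_possible_combinations available desired_towel cache)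

-- ===== LEMMAS AND PROOFS =====

-- the common semantics: the list of answers for all suffixes of `s`
-- (head = answer for `s` itself, relative to the ORIGINAL cache)
def specDp (available : List String) (cache0 : PySem.Dict String Int) : List Char → List Int
  | [] => [(PySem.Dict.get? cache0 (String.ofList ([] : List Char))).getD 1]
  | c :: t =>
    (PySem.Dict.get? cache0 (String.ofList (c :: t))).getD
      (((List.range (t.length + 1)).map
        (fun k => if available.contains (String.ofList ((c :: t).take (k + 1))) then
            (specDp available cache0 t).getD k 0 else 0)).sum)
      :: specDp available cache0 t

def specVal (available : List String) (cache0 : PySem.Dict String Int) (s : List Char) : Int :=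
  (specDp available cache0 s).headD 0

theorem specDp_cons (available : List String) (cache0 : PySem.Dict String Int) (c : Char)
    (t : List Char) :
    specDp available cache0 (c :: t) = specVal available cache0 (c :: t) :: specDp available cache0 t := by
  simp [specDp, specVal]

theorem specDp_nil (available : List String) (cache0 : PySem.Dict String Int) :
    specDp available cache0 [] = [specVal available cache0 []] := by
  simp [specDp, specVal]

theorem specVal_cached (available : List String) (cache0 : PySem.Dict String Int)
    (s : List Char) (v : Int) (h : PySem.Dict.get? cache0 (String.ofList s) = some v) :
    specVal available cache0 s = v := by
  cases s <;> simp [specVal, specDp, h]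

theorem specVal_nil (available : List String) (cache0 : PySem.Dict String Int)
    (h : PySem.Dict.get? cache0 (String.ofList ([] : List Char)) = none) :
    specVal available cache0 [] = 1 := by
  simp [specVal, specDp, h]

theorem specDp_getD (available : List String) (cache0 : PySem.Dict String Int) :
    ∀ (s : List Char) (m : Nat), m ≤ s.length →
      (specDp available cache0 s).getD m 0 = specVal available cache0 (s.drop m)
  | [], 0, _ => by rw [specDp_nil]; rfl
  | c :: t, 0, _ => by rw [specDp_cons]; rfl
  | c :: t, m + 1, h => by
      rw [specDp_cons]
      simpa using specDp_getD available cache0 t m (by simpa using h)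

theorem specVal_cons (available : List String) (cache0 : PySem.Dict String Int) (c : Char)
    (t : List Char) (h : PySem.Dict.get? cache0 (String.ofList (c :: t)) = none) :
    specVal available cache0 (c :: t) =
      ((List.range (t.length + 1)).map
        (fun k => if available.contains (String.ofList ((c :: t).take (k + 1))) then
            specVal available cache0 ((c :: t).drop (k + 1)) else 0)).sum := by
  rw [specVal, specDp, h]
  simp only [Option.getD_none, List.headD_cons]
  apply congrArg
  apply List.map_congr_left
  intro k hk
  rw [List.mem_range] at hk
  rw [specDp_getD available cache0 t k (by omega)]
  rfl

-- ===== B-side =====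

theorem ofList_contains (xs : List String) (x : String) :
    (PySem.Set.ofList xs).contains x = xs.contains x := by
  by_cases h : x ∈ xs <;> simp [h]

theorem cpcMaxLen_init (f : String → Nat) :
    ∀ (l : List String) (init : Nat),
      init ≤ l.foldl (fun m p => if f p > m then f p else m) init
  | [], init => le_refl _
  | p :: t, init => by
      refine le_trans ?_ (cpcMaxLen_init f t _)
      show init ≤ if f p > init then f p else init
      split <;> omega

theorem cpcMaxLen_ge (p : String) :
    ∀ (l : List String) (init : Nat), p ∈ l →
      p.toList.length ≤ l.foldl (fun m q => if q.toList.length > m then q.toList.length else m) init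
  | q :: t, init, h => by
      rcases List.mem_cons.mp h with rfl | h'
      · refine le_trans ?_ (cpcMaxLen_init (fun q => q.toList.length) t _)
        show p.toList.length ≤ if p.toList.length > init then p.toList.length else init
        split <;> omega
      · exact cpcMaxLen_ge p t _ h'

theorem mem_available_len_le (available : List String) (p : String) (h : p ∈ available) :
    p.toList.length ≤ cpcMaxLen available :=
  cpcMaxLen_ge p available 0 h

-- the conditional-accumulate loop is init + the sum of its contributions
theorem foldl_if_add (P : Nat → Prop) [DecidablePred P] (g : Nat → Int) :
    ∀ (l : List Nat) (init : Int),
      l.foldl (fun total k => if P k then total + g k else total) init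
        = init + (l.map (fun k => if P k then g k else 0)).sum
  | [], init => by simp
  | x :: t, init => by
      rw [List.foldl_cons, List.map_cons, List.sum_cons, foldl_if_add P g t]
      split <;> ring

theorem cpcVal_spec (available : List String) (cache0 : PySem.Dict String Int)
    (suffix : List Char) (dp : List Int)
    (hdp : ∀ k, k < suffix.length → dp.getD k 0 = specVal available cache0 (suffix.drop (k + 1))) :
    cpcVal (PySem.Set.ofList available) cache0 (cpcMaxLen available) suffix dp
      = specVal available cache0 suffix := by
  unfold cpcVal
  cases h : PySem.Dict.get? cache0 (String.ofList suffix) with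
  | some v => rw [specVal_cached available cache0 suffix v h]
  | none =>
    cases suffix with
    | nil => rw [specVal_nil available cache0 h]; simp
    | cons c t =>
      rw [if_neg (by simp)]
      rw [specVal_cons available cache0 c t h]
      rw [foldl_if_add, zero_add]
      -- replace dp-lookups and set membership by their spec values
      have hmap :
          ∀ l : List Nat, (∀ k ∈ l, k < t.length + 1) →
            (l.map (fun k =>
              if PySem.Set.contains (PySem.Set.ofList available) (String.ofList ((c :: t).take (k + 1))) then
                dp.getD k 0 else 0))
            = (l.map (fun k => if available.contains (String.ofList ((c :: t).take (k + 1))) then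
                specVal available cache0 ((c :: t).drop (k + 1)) else 0)) := by
        intro l hl
        apply List.map_congr_left
        intro k hk
        rw [ofList_contains, hdp k (by simpa using hl k hk)]
      rw [hmap _ (by
        intro k hk
        have := List.mem_range.mp hk
        simp only [List.length_cons] at this
        omega)]
      -- extend the truncated range: the extra terms vanish (prefix longer than every pattern)
      have hsplit : t.length + 1
          = min (cpcMaxLen available) (t.length + 1)
            + (t.length + 1 - min (cpcMaxLen available) (t.length + 1)) := by omega
      rw [hsplit, List.range_add, List.map_append, List.sum_append]
      have hzero : (((List.range (t.length + 1 - min (cpcMaxLen available) (t.length + 1))).map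
          (fun x => min (cpcMaxLen available) (t.length + 1) + x)).map
            (fun k => if available.contains (String.ofList ((c :: t).take (k + 1))) then
              specVal available cache0 ((c :: t).drop (k + 1)) else 0)).sum = 0 := by
        apply List.sum_eq_zero
        intro x hx
        simp only [List.mem_map, List.mem_range] at hx
        obtain ⟨k, ⟨m, hm, rfl⟩, rfl⟩ := hx
        have hbig : cpcMaxLen available < min (cpcMaxLen available) (t.length + 1) + m + 1 := by omega
        rw [if_neg]
        intro hmem
        have hmem' : String.ofList ((c :: t).take (min (cpcMaxLen available) (t.length + 1) + m + 1)) ∈ available := by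
          simpa using hmem
        have hlen := mem_available_len_le available _ hmem'
        simp only [String.toList_ofList, List.length_take, List.length_cons] at hlen
        omega
      rw [hzero, add_zero]
      · simp

theorem cpcGo_spec (available : List String) (cache0 : PySem.Dict String Int) (s : List Char) :
    ∀ k, k ≤ s.length →
      cpcGo (PySem.Set.ofList available) cache0 (cpcMaxLen available) s k
          (specDp available cache0 (s.drop k))
        = specDp available cache0 s
  | 0, _ => by simp [cpcGo]
  | k + 1, hk => by
      rw [cpcGo]
      have hd : s.drop k = s[k] :: s.drop (k + 1) := List.drop_eq_getElem_cons (by omega)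
      have hval : cpcVal (PySem.Set.ofList available) cache0 (cpcMaxLen available) (s.drop k)
          (specDp available cache0 (s.drop (k + 1))) = specVal available cache0 (s.drop k) := by
        apply cpcVal_spec
        intro j hj
        rw [specDp_getD available cache0 (s.drop (k + 1)) j (by
          have hj' : j < s.length - k := by simpa using hj
          have hL2 : (s.drop (k + 1)).length = s.length - (k + 1) := by simp
          omega)]
        rw [List.drop_drop, hd, List.drop_succ_cons, List.drop_drop]
      rw [hval]
      have : specVal available cache0 (s.drop k) :: specDp available cache0 (s.drop (k + 1))
          = specDp available cache0 (s.drop k) := by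
        rw [hd, specDp_cons, ← hd]
      rw [this]
      exact cpcGo_spec available cache0 s k (by omega)

theorem alt_eq_specVal (available : List String) (desired_towel : String)
    (cache : List (String × Int)) :
    count_possible_combinations_alt available desired_towel cache
      = specVal available (PySem.Dict.mk cache) desired_towel.toList := by
  unfold count_possible_combinations_alt
  simp only []
  set s := desired_towel.toList with hs
  set cache0 := PySem.Dict.mk cache with hc
  rw [cpcGo]
  -- the first loop iteration (j = n) produces specDp of the empty suffix …
  have h2 : cpcVal (PySem.Set.ofList available) cache0 (cpcMaxLen available) (s.drop s.length) []
        :: ([] : List Int) = specDp available cache0 (s.drop s.length) := by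
    rw [List.drop_length, specDp_nil]
    congr 1
    apply cpcVal_spec
    intro k hk
    simp at hk
  rw [h2, cpcGo_spec available cache0 s s.length (le_refl _), specVal]

-- ===== A-side =====

-- the working cache only ever extends the original one with spec-correct values
def GoodExt (available : List String) (cache0 c : PySem.Dict String Int) : Prop :=
  ∀ k : String,
    (∀ v, PySem.Dict.get? cache0 k = some v → PySem.Dict.get? c k = some v) ∧
    (∀ v, PySem.Dict.get? c k = some v →
      PySem.Dict.get? cache0 k = some v ∨ v = specVal available cache0 k.toList)

theorem goodExt_refl (available : List String) (cache0 : PySem.Dict String Int) :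
    GoodExt available cache0 cache0 :=
  fun _ => ⟨fun _ h => h, fun _ h => Or.inl h⟩

theorem goodExt_lookup (available : List String) (cache0 c : PySem.Dict String Int)
    (h : GoodExt available cache0 c) (key : String) (v : Int)
    (hv : PySem.Dict.get? c key = some v) : specVal available cache0 key.toList = v := by
  rcases (h key).2 v hv with h0 | h0
  · exact specVal_cached available cache0 key.toList v (by simpa using h0)
  · exact h0.symm

theorem goodExt_none (available : List String) (cache0 c : PySem.Dict String Int)
    (h : GoodExt available cache0 c) (key : String)
    (hn : PySem.Dict.get? c key = none) : PySem.Dict.get? cache0 key = none := by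
  cases h0 : PySem.Dict.get? cache0 key with
  | none => rfl
  | some v => rw [(h key).1 v h0] at hn; cases hn

theorem goodExt_insert (available : List String) (cache0 c : PySem.Dict String Int)
    (h : GoodExt available cache0 c) (key : String) (v : Int)
    (hv : v = specVal available cache0 key.toList) :
    GoodExt available cache0 (PySem.Dict.insert c key v) := by
  intro k
  by_cases hk : k = key
  · subst hk
    constructor
    · intro w hw
      rw [PySem.Dict.get?_insert_self]
      have hsw : specVal available cache0 k.toList = w :=
        specVal_cached available cache0 k.toList w (by simpa using hw)
      rw [hv, hsw]
    · intro w hw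
      rw [PySem.Dict.get?_insert_self] at hw
      right
      have hvw : v = w := by injection hw
      rw [← hvw, hv]
  · constructor
    · intro w hw
      rw [PySem.Dict.get?_insert_of_ne c v hk]
      exact (h k).1 w hw
    · intro w hw
      rw [PySem.Dict.get?_insert_of_ne c v hk] at hw
      exact (h k).2 w hw

-- the value still owed by the loop from index i on
def restSum (available : List String) (cache0 : PySem.Dict String Int) (s : List Char) (i : Nat) : Int :=
  ((List.range (s.length + 1 - i)).map
    (fun m => if available.contains (String.ofList (s.take (i + m))) then
        specVal available cache0 (s.drop (i + m)) else 0)).sum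

theorem restSum_step (available : List String) (cache0 : PySem.Dict String Int)
    (s : List Char) (i : Nat) (h2 : i ≤ s.length) :
    restSum available cache0 s i
      = (if available.contains (String.ofList (s.take i)) then
          specVal available cache0 (s.drop i) else 0) + restSum available cache0 s (i + 1) := by
  unfold restSum
  have hn : s.length + 1 - i = (s.length + 1 - (i + 1)) + 1 := by omega
  rw [hn, List.range_succ_eq_map, List.map_cons, List.sum_cons, List.map_map]
  simp only [Nat.add_zero]
  refine congrArg₂ (· + ·) rfl ?_
  refine congrArg List.sum (List.map_congr_left ?_)
  intro m _
  simp only [Function.comp_apply, Nat.succ_eq_add_one]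
  have h3 : i + (m + 1) = i + 1 + m := by omega
  rw [h3]

theorem restSum_last (available : List String) (cache0 : PySem.Dict String Int)
    (s : List Char) (i : Nat) (h : s.length < i) : restSum available cache0 s i = 0 := by
  unfold restSum
  have : s.length + 1 - i = 0 := by omega
  rw [this]
  simp

theorem loop_spec (available : List String) (cache0 : PySem.Dict String Int) (s : List Char)
    (IH : ∀ t : List Char, t.length < s.length → ∀ c, GoodExt available cache0 c →
      (cpcAux available t c).1 = specVal available cache0 t ∧
        GoodExt available cache0 (cpcAux available t c).2) :
    ∀ (j i : Nat) (counter : Int) (c : PySem.Dict String Int),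
      1 ≤ i → s.length + 1 - i = j → GoodExt available cache0 c →
      (cpcLoop available s i counter c).1 = counter + restSum available cache0 s i ∧
        GoodExt available cache0 (cpcLoop available s i counter c).2
  | 0, i, counter, c, h1, hj, hg => by
      rw [cpcLoop, dif_neg (by omega), restSum_last available cache0 s i (by omega)]
      exact ⟨by simp, hg⟩
  | j + 1, i, counter, c, h1, hj, hg => by
      have h2 : i ≤ s.length := by omega
      rw [cpcLoop, dif_pos ⟨h1, h2⟩]
      rw [restSum_step available cache0 s i h2]
      by_cases hmem : available.contains (String.ofList (s.take i))
      · rw [if_pos hmem]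
        have hlt : (s.drop i).length < s.length := by simp; omega
        obtain ⟨ha1, ha2⟩ := IH (s.drop i) hlt c hg
        obtain ⟨hl1, hl2⟩ := loop_spec available cache0 s IH j (i + 1)
          (counter + (cpcAux available (s.drop i) c).1) (cpcAux available (s.drop i) c).2
          (by omega) (by omega) ha2
        refine ⟨?_, hl2⟩
        rw [hl1, ha1, if_pos hmem]
        ring
      · rw [if_neg hmem]
        obtain ⟨hl1, hl2⟩ := loop_spec available cache0 s IH j (i + 1) counter c
          (by omega) (by omega) hg
        refine ⟨?_, hl2⟩
        rw [hl1, if_neg hmem]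
        ring

theorem restSum_one (available : List String) (cache0 : PySem.Dict String Int)
    (c : Char) (t : List Char) (h : PySem.Dict.get? cache0 (String.ofList (c :: t)) = none) :
    specVal available cache0 (c :: t) = restSum available cache0 (c :: t) 1 := by
  rw [specVal_cons available cache0 c t h]
  unfold restSum
  simp only [List.length_cons, Nat.add_sub_cancel]
  apply congrArg
  apply List.map_congr_left
  intro k _
  have : 1 + k = k + 1 := by omega
  rw [this]

theorem aux_spec (available : List String) (cache0 : PySem.Dict String Int) :
    ∀ (n : Nat) (s : List Char), s.length ≤ n → ∀ c, GoodExt available cache0 c →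
      (cpcAux available s c).1 = specVal available cache0 s ∧
        GoodExt available cache0 (cpcAux available s c).2 := by
  intro n
  induction n with
  | zero =>
    intro s hs c hg
    have hnil : s = [] := by cases s with
      | nil => rfl
      | cons a t => simp at hs
    subst hnil
    rw [cpcAux]
    cases h : PySem.Dict.get? c (String.ofList ([] : List Char)) with
    | some v =>
      refine ⟨?_, hg⟩
      have hv := goodExt_lookup available cache0 c hg _ v h
      simp only [String.toList_ofList] at hv
      exact hv.symm
    | none =>
      have h0 := goodExt_none available cache0 c hg _ h
      exact ⟨(specVal_nil available cache0 h0).symm, hg⟩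
  | succ n ihn =>
    intro s hs c hg
    rw [cpcAux]
    cases h : PySem.Dict.get? c (String.ofList s) with
    | some v =>
      refine ⟨?_, hg⟩
      have hv := goodExt_lookup available cache0 c hg _ v h
      simp only [String.toList_ofList] at hv
      exact hv.symm
    | none =>
      have h0 := goodExt_none available cache0 c hg _ h
      cases s with
      | nil => exact ⟨(specVal_nil available cache0 h0).symm, hg⟩
      | cons ch t =>
        rw [if_neg (by simp)]
        have IH : ∀ u : List Char, u.length < (ch :: t).length → ∀ cc, GoodExt available cache0 cc →
            (cpcAux available u cc).1 = specVal available cache0 u ∧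
              GoodExt available cache0 (cpcAux available u cc).2 := by
          intro u hu cc hgc
          exact ihn u (by simp at hu hs ⊢; omega) cc hgc
        obtain ⟨hl1, hl2⟩ := loop_spec available cache0 (ch :: t) IH
          ((ch :: t).length + 1 - 1) 1 0 c (le_refl 1) rfl hg
        have hv : (cpcLoop available (ch :: t) 1 0 c).1 = specVal available cache0 (ch :: t) := by
          rw [hl1, restSum_one available cache0 ch t h0]
          ring
        refine ⟨hv, ?_⟩
        apply goodExt_insert available cache0 _ hl2
        rw [hv]
        simp only [String.toList_ofList]

theorem a_eq_specVal (available : List String) (desired_towel : String)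
    (cache : List (String × Int)) :
    count_possible_combinations available desired_towel cache
      = specVal available (PySem.Dict.mk cache) desired_towel.toList := by
  unfold count_possible_combinations
  exact (aux_spec available (PySem.Dict.mk cache) desired_towel.toList.length
    desired_towel.toList (le_refl _) (PySem.Dict.mk cache)
    (goodExt_refl available (PySem.Dict.mk cache))).1

-- ===== VERDICT (by name: the statement is the Claim_ definition above) =====
theorem count_possible_combinations_spec : Claim_equal_count_possible_combinations := by
  intro available desired_towel cache _dom
  unfold Spec_count_possible_combinations
  rw [a_eq_specVal, alt_eq_specVal]
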